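-- pv_equiv track=rewrite | github.com/Zerohertz/Algorithm | Codility/Exercises/Algorithmic_skills/StrSymmetryPoint/main.py | solution
-- ===== SOURCE A (Python) =====
-- def solution(S):
--     # write your code in Python 3.8.10
--     N = len(S)
--     res = 0
--     for i in range(N // 2):
--         if S[i] == S[N - i - 1]:
--             res += 1
--         else:
--             return -1
--     if N % 2 == 0:
--         return -1
--     else:
--         return res
-- ===== SOURCE B (Python) =====
-- def solution(S):
--     N = len(S)
--     if N % 2 == 1 and S == S[::-1]:
--         return N // 2
--     return -1
-- ===== Notes on version B (the rewrite author's own statement) =====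
-- stated objective: idiomatic
-- what changed: Replaces the explicit half-length two-pointer loop with early exit and a counter by a whole-string reverse-and-compare (S == S[::-1]) guarded by the odd-length check, returning N // 2 directly.
import Mathlib
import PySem

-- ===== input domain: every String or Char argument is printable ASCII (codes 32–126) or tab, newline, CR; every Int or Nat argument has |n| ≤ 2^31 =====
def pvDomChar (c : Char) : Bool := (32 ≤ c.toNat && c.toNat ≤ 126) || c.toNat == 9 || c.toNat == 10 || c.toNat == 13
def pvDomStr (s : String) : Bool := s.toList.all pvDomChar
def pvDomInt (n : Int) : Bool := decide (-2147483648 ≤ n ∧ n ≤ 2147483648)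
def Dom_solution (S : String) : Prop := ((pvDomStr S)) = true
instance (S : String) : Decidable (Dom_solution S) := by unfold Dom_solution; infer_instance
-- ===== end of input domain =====

-- B replaces A's half-length two-pointer loop by an odd-length guard plus a whole-string
-- reverse-and-compare, returning N // 2 directly (idiomatic; same cost).

-- ===== PORT A =====
-- the 'for i in range(N // 2)' loop with counter `res` and early 'return -1'
def solutionGo (S : String) (N : Int) : List Int → Int → Int
  | [], res => if PySem.Int.mod N 2 = 0 then -1 else res
  | i :: rest, res =>
      if PySem.Str.pyGet? S i = PySem.Str.pyGet? S (N - i - 1) then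
        solutionGo S N rest (res + 1)
      else -1

def solution (S : String) : Int :=
  let N : Int := PySem.Str.len S
  solutionGo S N (PySem.List.pyRange 0 (PySem.Int.floordiv N 2) 1) 0

-- ===== PORT B =====
def solution_alt (S : String) : Int :=
  let N : Int := PySem.Str.len S
  if PySem.Int.mod N 2 = 1 ∧ some S = PySem.Str.slice? S none none (-1) then
    PySem.Int.floordiv N 2
  else -1

-- ===== PRECONDITION & SPEC =====
def Spec_solution (S : String) (out : Int) : Prop := out = solution_alt S
instance (S : String) (out : Int) : Decidable (Spec_solution S out) := by unfold Spec_solution; infer_instance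

-- ===== CLAIM (what is proved, stated in full; the proofs are below) =====
def Claim_equal_solution : Prop := ∀ (S : String), Dom_solution S → Spec_solution S (solution S)

-- ===== LEMMAS AND PROOFS =====

-- A's loop, characterised: -1 at the first mismatching pair, else the parity branch.
theorem solutionGo_spec (S : String) (N : Int) (l : List Int) (res : Int) :
    solutionGo S N l res =
      if l.all (fun i => PySem.Str.pyGet? S i = PySem.Str.pyGet? S (N - i - 1)) then
        (if PySem.Int.mod N 2 = 0 then -1 else res + l.length)
      else -1 := by
  induction l generalizing res with
  | nil => simp [solutionGo]
  | cons i rest ih =>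
    simp only [solutionGo, List.all_cons]
    by_cases h : PySem.Str.pyGet? S i = PySem.Str.pyGet? S (N - i - 1)
    · rw [if_pos h, ih]
      simp only [h, decide_true, Bool.true_and, List.length_cons]
      split_ifs <;> first | rfl | (push_cast; ring)
    · rw [if_neg h, if_neg (by
        intro hc
        exact h (of_decide_eq_true ((Bool.and_eq_true _ _).mp hc).1))]

-- the half-range pair condition of A is exactly "palindrome"
theorem half_pairs_iff (cs : List Char) :
    ((PySem.List.pyRange 0 (PySem.Int.floordiv (cs.length : Int) 2) 1).all
        (fun i => PySem.List.pyGet? cs i = PySem.List.pyGet? cs ((cs.length : Int) - i - 1))) = true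
      ↔ cs.reverse = cs := by
  rw [PySem.Int.floordiv_eq_ediv_of_pos (by norm_num), List.all_eq_true]
  constructor
  · intro h
    apply List.ext_getElem (by simp)
    intro k hk hk'
    rw [List.getElem_reverse]
    rcases Nat.lt_or_ge k (cs.length / 2) with hhalf | hhalf
    · have hm : ((k : Int)) ∈ PySem.List.pyRange 0 ((cs.length : Int) / 2) 1 := by
        rw [PySem.List.mem_pyRange_one]; omega
      have hpair := of_decide_eq_true (h _ hm)
      have hidx : (cs.length : Int) - (k : Int) - 1 = ((cs.length - 1 - k : Nat) : Int) := by omega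
      rw [hidx] at hpair
      simp only [PySem.List.pyGet?_natCast,
        List.getElem?_eq_getElem (show k < cs.length by omega),
        List.getElem?_eq_getElem (show cs.length - 1 - k < cs.length by omega)] at hpair
      exact (Option.some.inj hpair).symm
    · by_cases hmid : cs.length - 1 - k = k
      · simp only [hmid]
      · have hjh : cs.length - 1 - k < cs.length / 2 := by omega
        have hm : (((cs.length - 1 - k : Nat) : Int)) ∈
            PySem.List.pyRange 0 ((cs.length : Int) / 2) 1 := by
          rw [PySem.List.mem_pyRange_one]; omega
        have hpair := of_decide_eq_true (h _ hm)
        have hidx : (cs.length : Int) - ((cs.length - 1 - k : Nat) : Int) - 1 = ((k : Nat) : Int) := by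
          omega
        rw [hidx] at hpair
        simp only [PySem.List.pyGet?_natCast,
          List.getElem?_eq_getElem (show cs.length - 1 - k < cs.length by omega),
          List.getElem?_eq_getElem hk'] at hpair
        exact Option.some.inj hpair
  · intro hp i hi
    rw [PySem.List.mem_pyRange_one] at hi
    have hrev : ∀ (j : Nat), j < cs.length → cs[j]? = cs[cs.length - 1 - j]? := by
      intro j hj
      have h1 : cs.reverse[j]? = cs[cs.length - 1 - j]? := by
        rw [List.getElem?_reverse (by omega)]
      rw [hp] at h1
      exact h1
    have hk : i.toNat < cs.length := by omega
    have hi' : i = ((i.toNat : Nat) : Int) := by omega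
    have hidx : (cs.length : Int) - i - 1 = ((cs.length - 1 - i.toNat : Nat) : Int) := by omega
    rw [hidx, hi']
    simp only [PySem.List.pyGet?_natCast, decide_eq_true_eq]
    exact hrev i.toNat hk

-- ===== VERDICT (by name: the statement is the Claim_ definition above) =====
theorem solution_spec : Claim_equal_solution := by
  intro S _
  unfold Spec_solution solution solution_alt
  rw [solutionGo_spec, PySem.Str.slice?_none_none_neg_one]
  simp only [PySem.Str.len_eq, PySem.Str.pyGet?, PySem.Chars.pyGet?]
  have hstr : (some S = some (String.ofList S.toList.reverse)) ↔ S.toList.reverse = S.toList := by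
    constructor
    · intro h
      have := congrArg String.toList (Option.some.inj h)
      simpa using this.symm
    · intro h
      rw [h]
      simp
  have hfd : PySem.Int.floordiv ((S.toList.length : Nat) : Int) 2 = ((S.toList.length : Nat) : Int) / 2 :=
    PySem.Int.floordiv_eq_ediv_of_pos (by norm_num)
  have hmd : PySem.Int.mod ((S.toList.length : Nat) : Int) 2 = ((S.toList.length : Nat) : Int) % 2 :=
    PySem.Int.mod_eq_emod_of_pos (by norm_num)
  split_ifs with h1 h2 h3 h4 h5
  · rw [hmd] at h2
    rw [hmd] at h3
    omega
  · rfl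
  · rw [PySem.List.length_pyRange_one, hfd]
    omega
  · exfalso
    apply h4
    constructor
    · rw [hmd] at h2 ⊢
      omega
    · exact hstr.mpr ((half_pairs_iff S.toList).mp h1)
  · exfalso
    exact h1 ((half_pairs_iff S.toList).mpr (hstr.mp h5.2))
  · rfl
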